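-- pv_equiv track=rewrite | github.com/ReRosu/strange_three_in_row | test_funcs.py | trans_from_bd_to_python
-- ===== SOURCE A (Python) =====
-- def trans_from_bd_to_python(board: list[list[int]]) -> list[list[int]]:
--     res = []
--     for cell in board:
--         if len(res) < cell[1]+1:
--             for _ in range(0, cell[1]-len(res)+1):
--                 res.append([])
--         if len(res[cell[1]]) < cell[0]+1:
--             for _ in range(0, cell[0]-len(res[cell[1]])+1):
--                 res[cell[1]].append(0)
--         res[cell[1]][cell[0]] = cell[2]
--     return res
-- ===== SOURCE B (Python) =====
-- def trans_from_bd_to_python(board):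
--     rows = 0
--     rowmax = {}
--     for c in board:
--         x, y = c[0], c[1]
--         if y + 1 > rows:
--             rows = y + 1
--         if y not in rowmax or x > rowmax[y]:
--             rowmax[y] = x
--     grid = [[0] * (rowmax[y] + 1) if y in rowmax else [] for y in range(rows)]
--     for c in board:
--         grid[c[1]][c[0]] = c[2]
--     return grid
-- ===== Notes on version B (the rewrite author's own statement) =====
-- stated objective: alternative
-- what changed: B replaces A's on-demand incremental growing of rows/cells with a precompute pass (row count and per-row max x into a dict), builds the whole ragged grid at once, then a second pass writes each cell's value in order.
-- outside the precondition, e.g. on trans_from_bd_to_python([[1, 0, 5], [-2, 0, 7], [2, 0, 3]]): A returns [[7, 5, 3]], B returns [[0, 7, 3]]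
import Mathlib
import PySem

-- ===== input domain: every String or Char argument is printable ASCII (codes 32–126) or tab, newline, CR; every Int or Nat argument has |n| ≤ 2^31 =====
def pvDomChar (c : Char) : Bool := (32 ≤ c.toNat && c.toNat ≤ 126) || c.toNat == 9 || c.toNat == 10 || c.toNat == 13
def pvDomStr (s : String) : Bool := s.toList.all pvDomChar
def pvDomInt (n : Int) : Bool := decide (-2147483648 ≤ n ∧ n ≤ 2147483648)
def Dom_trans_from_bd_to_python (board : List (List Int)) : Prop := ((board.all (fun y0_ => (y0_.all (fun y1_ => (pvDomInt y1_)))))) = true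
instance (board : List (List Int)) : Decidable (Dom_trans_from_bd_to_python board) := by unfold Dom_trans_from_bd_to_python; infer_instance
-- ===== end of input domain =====

-- B precomputes the grid's ragged dimensions in one pass (row count + a dict of each row's
-- maximal x), builds the whole grid at once, and fills the values in a second pass, instead
-- of A's incremental on-demand growing; objective: alternative (same asymptotic cost).

-- cell accessors shared by both ports: cell[0], cell[1], cell[2]
-- (.getD 0 and .toNat are exact under Pre_: cells have length ≥ 3 and nonnegative coordinates)
def pvX (c : List Int) : Nat := ((PySem.List.pyGet? c 0).getD 0).toNat
def pvY (c : List Int) : Nat := ((PySem.List.pyGet? c 1).getD 0).toNat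
def pvV (c : List Int) : Int := (PySem.List.pyGet? c 2).getD 0
def pvXI (c : List Int) : Int := (PySem.List.pyGet? c 0).getD 0
def pvYI (c : List Int) : Int := (PySem.List.pyGet? c 1).getD 0

-- ===== PORT A =====
-- one iteration of A's loop body: grow the row list to y+1 rows, grow row y to x+1 cells, assign
def pvStepA (res : List (List Int)) (cell : List Int) : List (List Int) :=
  let y := pvY cell
  let x := pvX cell
  let res1 := if res.length < y + 1 then res ++ List.replicate (y + 1 - res.length) ([] : List Int) else res
  let row := res1.getD y []
  let row1 := if row.length < x + 1 then row ++ List.replicate (x + 1 - row.length) (0 : Int) else row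
  res1.set y (row1.set x (pvV cell))

def trans_from_bd_to_python (board : List (List Int)) : List (List Int) :=
  board.foldl pvStepA []

-- ===== PORT B =====
-- first pass: row count and each present row's maximal x, kept in a dict keyed by the Python int y
def pvDimStep (st : Int × PySem.Dict Int Int) (c : List Int) : Int × PySem.Dict Int Int :=
  let x := pvXI c
  let y := pvYI c
  let rows := if y + 1 > st.1 then y + 1 else st.1
  let rm := match st.2.get? y with
            | none => st.2.insert y x
            | some m => if x > m then st.2.insert y x else st.2
  (rows, rm)

-- second pass: grid[c[1]][c[0]] = c[2]
def pvFillStep (grid : List (List Int)) (c : List Int) : List (List Int) :=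
  grid.set (pvY c) ((grid.getD (pvY c) []).set (pvX c) (pvV c))

def trans_from_bd_to_python_alt (board : List (List Int)) : List (List Int) :=
  let st := board.foldl pvDimStep (0, PySem.Dict.empty)
  let grid := (PySem.List.pyRange 0 st.1 1).map (fun y =>
    match st.2.get? y with
    | some m => List.replicate (m + 1).toNat (0 : Int)
    | none => ([] : List Int))
  board.foldl pvFillStep grid

-- ===== PRECONDITION & SPEC =====
-- Pre_ excludes cells shorter than 3 (A raises IndexError there) and cells with a negative x or
-- y coordinate, where A's value (when it returns one at all) is an accident of Python's
-- negative-index wraparound against the portion of the grid grown so far.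
def Pre_trans_from_bd_to_python (board : List (List Int)) : Prop :=
  ∀ c ∈ board, 3 ≤ c.length ∧ 0 ≤ pvXI c ∧ 0 ≤ pvYI c
instance (board : List (List Int)) : Decidable (Pre_trans_from_bd_to_python board) := by
  unfold Pre_trans_from_bd_to_python; infer_instance

def pvWitness_trans_from_bd_to_python : List (List Int) := [[0, 1, 7], [2, 0, -3], [0, 1, 5]]

def Spec_trans_from_bd_to_python (board : List (List Int)) (out : List (List Int)) : Prop := out = trans_from_bd_to_python_alt board
instance (board : List (List Int)) (out : List (List Int)) : Decidable (Spec_trans_from_bd_to_python board out) := by unfold Spec_trans_from_bd_to_python; infer_instance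

-- ===== CLAIM (what is proved, stated in full; the proofs are below) =====
def Claim_equal_trans_from_bd_to_python : Prop := ∀ (board : List (List Int)), Dom_trans_from_bd_to_python board → Pre_trans_from_bd_to_python board → Spec_trans_from_bd_to_python board (trans_from_bd_to_python board)

-- ===== LEMMAS AND PROOFS =====

def pvGetDSet (l : List (List Int)) (i j : Nat) (a : List Int) :
    (l.set i a).getD j [] = if i = j ∧ i < l.length then a else l.getD j [] := by
  rw [List.getD_eq_getElem?_getD, List.getD_eq_getElem?_getD, List.getElem?_set]
  split_ifs with h1 h2 h3 h4 <;> simp_all <;> omega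

def pvGetDPadRows (G : List (List Int)) (n k : Nat) :
    ((G ++ List.replicate n ([] : List Int)).getD k []) = G.getD k [] := by
  rw [List.getD_eq_getElem?_getD, List.getD_eq_getElem?_getD]
  by_cases h : k < G.length
  · rw [List.getElem?_append_left h]
  · rw [List.getElem?_append_right (by omega), List.getElem?_replicate]
    split_ifs <;> simp [List.getElem?_eq_none (by omega : G.length ≤ k)]



def pvSh (G : List (List Int)) (R : Nat) (w : Nat → Nat) : Prop :=
  G.length = R ∧ ∀ k, (G.getD k []).length = w k

-- res1.getD k [] = G.getD k []
theorem pv_res1_getD (G : List (List Int)) (y k : Nat) :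
    ((if G.length < y + 1 then G ++ List.replicate (y + 1 - G.length) ([] : List Int) else G).getD k []) = G.getD k [] := by
  split_ifs with h
  · exact pvGetDPadRows G _ k
  · rfl

theorem pv_res1_length (G : List (List Int)) (y : Nat) :
    ((if G.length < y + 1 then G ++ List.replicate (y + 1 - G.length) ([] : List Int) else G).length) = max G.length (y + 1) := by
  split_ifs with h <;> simp <;> omega

theorem pv_stepA_length (G : List (List Int)) (c : List Int) :
    (pvStepA G c).length = max G.length (pvY c + 1) := by
  simp only [pvStepA, List.length_set]
  exact pv_res1_length G (pvY c)

theorem pv_stepA_getD (G : List (List Int)) (c : List Int) (k : Nat) :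
    (pvStepA G c).getD k [] =
      if k = pvY c then
        ((if (G.getD (pvY c) []).length < pvX c + 1 then
            G.getD (pvY c) [] ++ List.replicate (pvX c + 1 - (G.getD (pvY c) []).length) (0 : Int)
          else G.getD (pvY c) []).set (pvX c) (pvV c))
      else G.getD k [] := by
  simp only [pvStepA]
  rw [pvGetDSet, pv_res1_getD]
  have hlt : pvY c < (if G.length < pvY c + 1 then G ++ List.replicate (pvY c + 1 - G.length) ([] : List Int) else G).length := by
    rw [pv_res1_length]; omega
  by_cases hk : k = pvY c
  · subst hk; rw [if_pos ⟨rfl, hlt⟩, if_pos rfl]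
  · rw [if_neg (by intro ⟨h1, _⟩; exact hk h1.symm), if_neg hk, pv_res1_getD]

theorem pv_sh_stepA (G : List (List Int)) (c : List Int) (R : Nat) (w : Nat → Nat)
    (h : pvSh G R w) :
    pvSh (pvStepA G c) (max R (pvY c + 1))
      (fun k => if k = pvY c then max (w k) (pvX c + 1) else w k) := by
  obtain ⟨hL, hW⟩ := h
  constructor
  · rw [pv_stepA_length, hL]
  · intro k
    beta_reduce
    rw [pv_stepA_getD]
    by_cases hk : k = pvY c
    · subst hk
      simp only [if_pos (show pvY c = pvY c from rfl), if_true]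
      rw [List.length_set]
      have hb := hW (pvY c)
      by_cases h1 : (G.getD (pvY c) []).length < pvX c + 1
      · rw [if_pos h1, List.length_append, List.length_replicate]; omega
      · rw [if_neg h1, hb]; omega
    · simp only [if_neg hk, hW]

def pvR (L : List (List Int)) : Nat := L.foldl (fun r c => max r (pvY c + 1)) 0
def pvW (L : List (List Int)) (k : Nat) : Nat :=
  L.foldl (fun a c => if pvY c = k then max a (pvX c + 1) else a) 0

theorem pvR_append (L : List (List Int)) (c : List Int) :
    pvR (L ++ [c]) = max (pvR L) (pvY c + 1) := by
  unfold pvR; rw [List.foldl_append]; rfl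

theorem pvW_append (L : List (List Int)) (c : List Int) (k : Nat) :
    pvW (L ++ [c]) k = if pvY c = k then max (pvW L k) (pvX c + 1) else pvW L k := by
  unfold pvW; rw [List.foldl_append]; rfl

theorem pv_shA (L : List (List Int)) : pvSh (L.foldl pvStepA []) (pvR L) (pvW L) := by
  induction L using List.reverseRecOn with
  | nil => exact ⟨rfl, fun k => rfl⟩
  | append_singleton L c ih =>
    rw [List.foldl_append]
    obtain ⟨h1, h2⟩ := pv_sh_stepA _ c _ _ ih
    refine ⟨?_, ?_⟩
    · simpa [pvR_append] using h1
    · intro k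
      have := h2 k
      simp only [List.foldl_cons, List.foldl_nil] at this ⊢
      rw [this, pvW_append]
      by_cases hk : pvY c = k
      · rw [if_pos hk, if_pos hk.symm]
      · rw [if_neg hk, if_neg (fun h => hk h.symm)]

def pvPad (R : Nat) (w : Nat → Nat) (G : List (List Int)) : List (List Int) :=
  (List.range R).map (fun y => G.getD y [] ++ List.replicate (w y - (G.getD y []).length) 0)

theorem pv_pad_length (R : Nat) (w : Nat → Nat) (G : List (List Int)) :
    (pvPad R w G).length = R := by
  simp [pvPad]

theorem pv_pad_getD (R : Nat) (w : Nat → Nat) (G : List (List Int)) (k : Nat) :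
    (pvPad R w G).getD k [] =
      if k < R then G.getD k [] ++ List.replicate (w k - (G.getD k []).length) 0 else [] := by
  unfold pvPad
  rw [List.getD_eq_getElem?_getD, List.getElem?_map]
  by_cases h : k < R
  · rw [List.getElem?_range h, if_pos h]; rfl
  · rw [List.getElem?_eq_none (by simpa using Nat.le_of_not_lt h), if_neg h]; rfl

theorem pv_ext (A B : List (List Int)) (h1 : A.length = B.length)
    (h2 : ∀ k, A.getD k [] = B.getD k []) : A = B := by
  apply List.ext_getElem h1
  intro i hi1 hi2
  have := h2 i
  rwa [List.getD_eq_getElem?_getD, List.getD_eq_getElem?_getD,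
    List.getElem?_eq_getElem hi1, List.getElem?_eq_getElem hi2] at this

theorem pv_pad_self (G : List (List Int)) (R : Nat) (w : Nat → Nat) (h : pvSh G R w) :
    pvPad R w G = G := by
  obtain ⟨hL, hW⟩ := h
  apply pv_ext _ _ (by rw [pv_pad_length, hL])
  intro k
  rw [pv_pad_getD, hW k]
  by_cases hk : k < R
  · rw [if_pos hk]; simp
  · rw [if_neg hk, List.getD_eq_getElem?_getD, List.getElem?_eq_none (by omega)]; rfl

theorem pv_row (r : List Int) (x : Nat) (v : Int) (W : Nat) (hn : r.length ≤ W) (hx : x < W) :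
    (r ++ List.replicate (W - r.length) 0).set x v
      = (if r.length < x + 1 then r ++ List.replicate (x + 1 - r.length) (0 : Int) else r).set x v
          ++ List.replicate (W - max r.length (x + 1)) 0 := by
  by_cases h1 : r.length < x + 1
  · rw [if_pos h1]
    have hsplit : W - r.length = (x + 1 - r.length) + (W - (x + 1)) := by omega
    rw [hsplit, List.replicate_add, ← List.append_assoc, List.set_append,
      if_pos (by simp; omega), Nat.max_eq_right (by omega)]
  · rw [if_neg h1, Nat.max_eq_left (by omega)]
    rw [List.set_append, if_pos (by omega)]

theorem pv_fill_pad (G : List (List Int)) (c : List Int) (R : Nat) (w : Nat → Nat)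
    (hlen : G.length ≤ R) (hrow : ∀ k, (G.getD k []).length ≤ w k)
    (hy : pvY c < R) (hx : pvX c + 1 ≤ w (pvY c)) :
    pvFillStep (pvPad R w G) c = pvPad R w (pvStepA G c) := by
  unfold pvFillStep
  apply pv_ext _ _ (by rw [List.length_set, pv_pad_length, pv_pad_length])
  intro k
  rw [pvGetDSet]
  simp only [pv_pad_getD, pv_pad_length]
  by_cases hk : pvY c = k
  · subst hk
    rw [if_pos ⟨rfl, hy⟩, if_pos hy, if_pos hy]
    rw [pv_row _ _ _ _ (hrow _) (by omega), pv_stepA_getD, if_pos rfl]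
    congr 2
    rw [List.length_set]
    split_ifs with h1
    · rw [List.length_append, List.length_replicate]; omega
    · omega
  · rw [if_neg (by intro ⟨h1, _⟩; exact hk h1)]
    by_cases hkR : k < R
    · rw [if_pos hkR, if_pos hkR, pv_stepA_getD, if_neg (fun h => hk h.symm)]
    · rw [if_neg hkR, if_neg hkR]

theorem pv_fill_fold (L : List (List Int)) (G : List (List Int)) (R : Nat) (w : Nat → Nat)
    (hc : ∀ c ∈ L, pvY c < R ∧ pvX c + 1 ≤ w (pvY c))
    (hlen : G.length ≤ R) (hrow : ∀ k, (G.getD k []).length ≤ w k) :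
    L.foldl pvFillStep (pvPad R w G) = pvPad R w (L.foldl pvStepA G) := by
  induction L generalizing G with
  | nil => rfl
  | cons c L ih =>
    simp only [List.foldl_cons]
    obtain ⟨hy, hx⟩ := hc c (List.mem_cons_self ..)
    rw [pv_fill_pad G c R w hlen hrow hy hx]
    apply ih _ (fun d hd => hc d (List.mem_cons_of_mem _ hd))
    · rw [pv_stepA_length]; omega
    · intro k
      rw [pv_stepA_getD]
      by_cases hk : k = pvY c
      · subst hk
        rw [if_pos rfl, List.length_set]
        split_ifs with h1
        · rw [List.length_append, List.length_replicate]; omega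
        · exact hrow _
      · rw [if_neg hk]; exact hrow k

theorem pvR_ge (L : List (List Int)) (a : Nat) :
    a ≤ L.foldl (fun r c => max r (pvY c + 1)) a := by
  induction L generalizing a with
  | nil => exact le_refl a
  | cons d L ih => exact le_trans (le_max_left _ _) (ih _)

theorem pvW_ge (L : List (List Int)) (k : Nat) (a : Nat) :
    a ≤ L.foldl (fun a c => if pvY c = k then max a (pvX c + 1) else a) a := by
  induction L generalizing a with
  | nil => exact le_refl a
  | cons d L ih =>
    refine le_trans ?_ (ih _)
    beta_reduce
    split_ifs with h
    · exact le_max_left _ _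
    · exact le_refl a

theorem pvR_mono (L : List (List Int)) {a b : Nat} (h : a ≤ b) :
    L.foldl (fun r c => max r (pvY c + 1)) a ≤ L.foldl (fun r c => max r (pvY c + 1)) b := by
  induction L generalizing a b with
  | nil => exact h
  | cons d L ih =>
    simp only [List.foldl_cons]
    exact ih (by beta_reduce; omega)

theorem pvW_mono (L : List (List Int)) (k : Nat) {a b : Nat} (h : a ≤ b) :
    L.foldl (fun a c => if pvY c = k then max a (pvX c + 1) else a) a
      ≤ L.foldl (fun a c => if pvY c = k then max a (pvX c + 1) else a) b := by
  induction L generalizing a b with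
  | nil => exact h
  | cons d L ih =>
    simp only [List.foldl_cons]
    apply ih
    split_ifs with hd
    · omega
    · exact h

theorem pv_bounds (L : List (List Int)) (c : List Int) (hc : c ∈ L) :
    pvY c < pvR L ∧ pvX c + 1 ≤ pvW L (pvY c) := by
  induction L with
  | nil => cases hc
  | cons d L ih =>
    rcases List.mem_cons.mp hc with h | h
    · subst h
      constructor
      · have h1 : pvY c + 1 ≤ max 0 (pvY c + 1) := le_max_right _ _
        exact Nat.lt_of_lt_of_le (by omega) (le_trans h1 (pvR_ge L _))
      · unfold pvW
        simp only [List.foldl_cons]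
        beta_reduce
        rw [if_pos trivial]
        exact le_trans (le_max_right _ _) (pvW_ge L _ _)
    · obtain ⟨h1, h2⟩ := ih h
      constructor
      · exact Nat.lt_of_lt_of_le h1 (pvR_mono L (by omega))
      · refine le_trans h2 ?_
        unfold pvW
        simp only [List.foldl_cons]
        apply pvW_mono
        beta_reduce
        split_ifs with hd
        · omega
        · omega


theorem pvDimStep_eq (st : Int × PySem.Dict Int Int) (c : List Int) :
    pvDimStep st c
      = (if pvYI c + 1 > st.1 then pvYI c + 1 else st.1,
         match st.2.get? (pvYI c) with
          | none => st.2.insert (pvYI c) (pvXI c)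
          | some m => if pvXI c > m then st.2.insert (pvYI c) (pvXI c) else st.2) := rfl

theorem pv_dim_fst_fold (L : List (List Int)) (r : Int) (d : PySem.Dict Int Int) :
    (L.foldl pvDimStep (r, d)).1
      = L.foldl (fun r c => if pvYI c + 1 > r then pvYI c + 1 else r) r := by
  induction L generalizing r d with
  | nil => rfl
  | cons c L ih =>
    simp only [List.foldl_cons]
    rw [pvDimStep_eq]
    beta_reduce
    cases hdy : (r, d).2.get? (pvYI c) <;> exact ih _ _

theorem pv_rows_eq (L : List (List Int)) (h : ∀ c ∈ L, 0 ≤ pvYI c) (a : Nat) :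
    L.foldl (fun r c => if pvYI c + 1 > r then pvYI c + 1 else r) (a : Int)
      = ((L.foldl (fun r c => max r (pvY c + 1)) a : Nat) : Int) := by
  induction L generalizing a with
  | nil => rfl
  | cons c L ih =>
    simp only [List.foldl_cons]
    have h0 : 0 ≤ pvYI c := (h c (List.mem_cons_self ..))
    have hy : ((pvY c : Nat) : Int) = pvYI c := Int.toNat_of_nonneg h0
    have hstep : (if pvYI c + 1 > (a : Int) then pvYI c + 1 else (a : Int))
        = ((max a (pvY c + 1) : Nat) : Int) := by
      rw [← hy]; push_cast; split_ifs <;> omega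
    beta_reduce
    rw [hstep]
    exact ih (fun c hc => h c (List.mem_cons_of_mem _ hc)) _

def pvMStep (k : Int) (o : Option Int) (c : List Int) : Option Int :=
  if pvYI c = k then
    some (match o with
          | none => pvXI c
          | some m => if pvXI c > m then pvXI c else m)
  else o

theorem pv_dim_get? (L : List (List Int)) (r : Int) (d : PySem.Dict Int Int) (k : Int) :
    (L.foldl pvDimStep (r, d)).2.get? k = L.foldl (pvMStep k) (d.get? k) := by
  induction L generalizing r d with
  | nil => rfl
  | cons c L ih =>
    simp only [List.foldl_cons]
    rw [pvDimStep_eq]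
    have hstep : ∀ d' : PySem.Dict Int Int,
        (match d.get? (pvYI c) with
          | none => d.insert (pvYI c) (pvXI c)
          | some m => if pvXI c > m then d.insert (pvYI c) (pvXI c) else d).get? k
        = pvMStep k (d.get? k) c := by
      intro _
      unfold pvMStep
      cases hdy : d.get? (pvYI c) with
      | none =>
        dsimp only
        rw [PySem.Dict.get?_insert]
        by_cases hk : pvYI c = k
        · subst hk
          rw [if_pos rfl, if_pos rfl, hdy]
        · rw [if_neg (fun hh => hk hh.symm), if_neg hk]
      | some m =>
        dsimp only
        by_cases hk : pvYI c = k
        · subst hk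
          rw [if_pos rfl, hdy]
          dsimp only
          split_ifs with hx
          · rw [PySem.Dict.get?_insert, if_pos rfl]
          · rw [hdy]
        · rw [if_neg hk]
          split_ifs with hx
          · rw [PySem.Dict.get?_insert, if_neg (fun hh => hk hh.symm)]
          · rfl
    rw [ih, hstep d]

def pvOptW (o : Option Int) : Nat := match o with | none => 0 | some m => (m + 1).toNat

theorem pv_optW_fold (L : List (List Int)) (k : Int) (hk : 0 ≤ k)
    (h : ∀ c ∈ L, 0 ≤ pvXI c ∧ 0 ≤ pvYI c) (o : Option Int) (ho : ∀ m, o = some m → 0 ≤ m) :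
    pvOptW (L.foldl (pvMStep k) o)
      = L.foldl (fun a c => if pvY c = k.toNat then max a (pvX c + 1) else a) (pvOptW o) := by
  induction L generalizing o with
  | nil => rfl
  | cons c L ih =>
    simp only [List.foldl_cons]
    have hx0 : 0 ≤ pvXI c := (h c (List.mem_cons_self ..)).1
    have hy0 : 0 ≤ pvYI c := (h c (List.mem_cons_self ..)).2
    have htail : ∀ c ∈ L, 0 ≤ pvXI c ∧ 0 ≤ pvYI c :=
      fun d hd => h d (List.mem_cons_of_mem _ hd)
    have hcond : (pvYI c = k) ↔ (pvY c = k.toNat) := by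
      rw [show pvY c = (pvYI c).toNat from rfl]
      omega
    by_cases hc1 : pvYI c = k
    · cases o with
      | none =>
        simp only [pvMStep, if_pos hc1]
        beta_reduce
        rw [if_pos (hcond.mp hc1)]
        rw [ih htail _ (by rintro m hm; injection hm with hm; omega)]
        congr 1
        rw [show pvX c = (pvXI c).toNat from rfl]
        unfold pvOptW
        dsimp only
        omega
      | some m =>
        have hm0 : 0 ≤ m := ho m rfl
        simp only [pvMStep, if_pos hc1]
        beta_reduce
        rw [if_pos (hcond.mp hc1)]
        rw [ih htail _ (by
          rintro m' hm'
          injection hm' with hm'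
          split_ifs at hm' <;> omega)]
        congr 1
        rw [show pvX c = (pvXI c).toNat from rfl]
        unfold pvOptW
        dsimp only
        split_ifs with hxm <;> omega
    · simp only [pvMStep, if_neg hc1]
      beta_reduce
      rw [if_neg (fun hh => hc1 (hcond.mpr hh))]
      exact ih htail o ho

theorem pv_main (board : List (List Int))
    (hpre : ∀ c ∈ board, 3 ≤ c.length ∧ 0 ≤ pvXI c ∧ 0 ≤ pvYI c) :
    (board.foldl pvFillStep
      ((PySem.List.pyRange 0 (board.foldl pvDimStep (0, PySem.Dict.empty)).1 1).map (fun y =>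
        match (board.foldl pvDimStep (0, PySem.Dict.empty)).2.get? y with
        | some m => List.replicate (m + 1).toNat (0 : Int)
        | none => ([] : List Int))))
      = board.foldl pvStepA [] := by
  have hXY : ∀ c ∈ board, 0 ≤ pvXI c ∧ 0 ≤ pvYI c :=
    fun c hc => ⟨(hpre c hc).2.1, (hpre c hc).2.2⟩
  have h1 : (board.foldl pvDimStep (0, PySem.Dict.empty)).1 = (pvR board : Int) := by
    rw [pv_dim_fst_fold]
    have := pv_rows_eq board (fun c hc => (hXY c hc).2) 0
    simpa using this
  have hget : ∀ (j : Int), 0 ≤ j →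
      (match (board.foldl pvDimStep (0, PySem.Dict.empty)).2.get? j with
        | some m => List.replicate (m + 1).toNat (0 : Int)
        | none => ([] : List Int)) = List.replicate (pvW board j.toNat) 0 := by
    intro j hj
    rw [pv_dim_get?]
    have hnone : (PySem.Dict.empty : PySem.Dict Int Int).get? j = none := by simp
    rw [hnone]
    have hm : ∀ o : Option Int,
        (match o with
          | some m => List.replicate (m + 1).toNat (0 : Int)
          | none => ([] : List Int)) = List.replicate (pvOptW o) 0 := by
      intro o; cases o <;> rfl
    rw [hm, pv_optW_fold board j hj hXY none (by simp)]
    rfl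
  have hgrid : ((PySem.List.pyRange 0 (board.foldl pvDimStep (0, PySem.Dict.empty)).1 1).map (fun y =>
        match (board.foldl pvDimStep (0, PySem.Dict.empty)).2.get? y with
        | some m => List.replicate (m + 1).toNat (0 : Int)
        | none => ([] : List Int)))
      = pvPad (pvR board) (pvW board) [] := by
    rw [h1, PySem.List.pyRange_one, List.map_map]
    unfold pvPad
    have hR : (((pvR board : Int)) - 0).toNat = pvR board := by omega
    rw [hR]
    apply List.map_congr_left
    intro j hj
    have hj0 : (0 : Int) ≤ (0 : Int) + (j : Int) := by omega
    simp only [Function.comp]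
    rw [hget _ hj0]
    have : ((0 : Int) + (j : Int)).toNat = j := by omega
    rw [this]
    simp
  rw [hgrid,
    pv_fill_fold board [] (pvR board) (pvW board) (fun c hc => pv_bounds board c hc)
      (by simp) (fun k => by simp),
    pv_pad_self _ _ _ (pv_shA board)]

-- ===== VERDICT (by name: the statement is the Claim_ definition above) =====
theorem trans_from_bd_to_python_spec : Claim_equal_trans_from_bd_to_python := by
  intro board _ hpre
  unfold Spec_trans_from_bd_to_python trans_from_bd_to_python trans_from_bd_to_python_alt
  exact (pv_main board hpre).symm
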